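-- pv_equiv track=rewrite | github.com/sajjadt/uvapy | combinatorics/p10098.py | gen_permuation_sorted
-- ===== SOURCE A (Python) =====
-- def gen_permuation_sorted(letters, current_str):
--   if len(letters) == 0:
--     yield current_str
--   else:
--     unique_letters = set()
--     for i in range(len(letters)):
--       if not letters[i] in unique_letters:
--         unique_letters.add(letters[i])
--         yield from gen_permuation_sorted(letters[:i]+letters[i+1:], current_str + letters[i])
-- ===== SOURCE B (Python) =====
-- def gen_permuation_sorted(letters, current_str):
--     # Iterative DFS with an explicit stack instead of recursion.
--     stack = [(letters, current_str)]
--     while stack: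
--         rem, cur = stack.pop()
--         if not rem:
--             yield cur
--         else:
--             seen = set()
--             children = []
--             for i in range(len(rem)):
--                 c = rem[i]
--                 if c not in seen:
--                     seen.add(c)
--                     children.append((rem[:i] + rem[i+1:], cur + c))
--             stack.extend(reversed(children))
-- ===== Notes on version B (the rewrite author's own statement) =====
-- stated objective: alternative
-- what changed: Replaced A's recursive generator by an iterative depth-first traversal over an explicit stack of (remaining, built) frames, pushing each frame's distinct-letter children in reverse so the emission order is identical.
import Mathlib
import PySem

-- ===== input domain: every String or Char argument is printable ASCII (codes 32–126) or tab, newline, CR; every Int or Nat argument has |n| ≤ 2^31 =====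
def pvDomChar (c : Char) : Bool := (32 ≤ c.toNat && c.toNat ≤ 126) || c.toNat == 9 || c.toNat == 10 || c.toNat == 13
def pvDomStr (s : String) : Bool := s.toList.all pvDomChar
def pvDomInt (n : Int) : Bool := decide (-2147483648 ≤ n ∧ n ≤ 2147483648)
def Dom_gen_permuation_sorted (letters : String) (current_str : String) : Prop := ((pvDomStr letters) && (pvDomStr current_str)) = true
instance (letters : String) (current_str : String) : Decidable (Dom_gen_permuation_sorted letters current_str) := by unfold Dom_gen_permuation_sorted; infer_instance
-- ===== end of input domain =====

-- B replaces A's recursive generator by an iterative DFS over an explicit stack of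
-- (remaining, built) frames (objective: alternative); same outputs in the same order.

-- ===== PORT A =====
-- A is a recursive generator; the list of yielded strings is returned. The for-loop over
-- i in range(len(letters)) is the structural recursion pvLoopA over (prefix, rest):
-- letters[:i]+letters[i+1:] is pre ++ rs, the per-call set() of seen letters is a PySem.Set.
mutual
def pvGenA (letters : List Char) (cur : List Char) : List String :=
  if letters.isEmpty then [String.ofList cur]
  else pvLoopA [] letters (PySem.Set.ofList []) cur
termination_by (2 * letters.length + 1, 0)
decreasing_by simp [Prod.lex_def]

def pvLoopA (pre : List Char) (rest : List Char) (seen : PySem.Set Char) (cur : List Char) :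
    List String :=
  match rest with
  | [] => []
  | c :: rs =>
    if PySem.Set.contains seen c then pvLoopA (pre ++ [c]) rs seen cur
    else pvGenA (pre ++ rs) (cur ++ [c]) ++ pvLoopA (pre ++ [c]) rs (PySem.Set.add seen c) cur
termination_by (2 * (pre.length + rest.length), rest.length)
decreasing_by
  all_goals (simp [Prod.lex_def]; omega)
end

def gen_permuation_sorted (letters : String) (current_str : String) : List String :=
  pvGenA letters.toList current_str.toList

-- ===== PORT B =====
-- The inner for-loop of Source B building `children` (scan with a per-frame seen set):
def pvChildScan (pre rest : List Char) (seen : PySem.Set Char) (cur : List Char) :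
    List (List Char × List Char) :=
  match rest with
  | [] => []
  | c :: rs =>
    if PySem.Set.contains seen c then pvChildScan (pre ++ [c]) rs seen cur
    else (pre ++ rs, cur ++ [c]) :: pvChildScan (pre ++ [c]) rs (PySem.Set.add seen c) cur

-- termination measure fact for the while-loop (cited by pvRun's decreasing_by)
theorem pvChildScan_measure (rest : List Char) : ∀ (pre : List Char) (seen : PySem.Set Char)
    (cur : List Char),
    ((pvChildScan pre rest seen cur).map (fun f => (f.1.length + 1).factorial)).sum
      ≤ rest.length * (pre.length + rest.length).factorial := by
  induction rest with
  | nil => intro pre seen cur; simp [pvChildScan]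
  | cons c rs ih =>
    intro pre seen cur
    have e : pre.length + 1 + rs.length = pre.length + (rs.length + 1) := by omega
    by_cases h : PySem.Set.contains seen c
    · simp only [pvChildScan, if_pos h]
      have := ih (pre ++ [c]) seen cur
      simp only [List.length_append, List.length_cons, List.length_nil, Nat.zero_add] at this ⊢
      rw [e] at this
      calc _ ≤ rs.length * (pre.length + (rs.length + 1)).factorial := this
        _ ≤ (rs.length + 1) * (pre.length + (rs.length + 1)).factorial :=
            Nat.mul_le_mul_right _ (by omega)
    · simp only [pvChildScan, if_neg h, List.map_cons, List.sum_cons]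
      have := ih (pre ++ [c]) (PySem.Set.add seen c) cur
      simp only [List.length_append, List.length_cons, List.length_nil, Nat.zero_add] at this ⊢
      rw [e] at this
      have e2 : pre.length + rs.length + 1 = pre.length + (rs.length + 1) := by omega
      rw [e2]
      nlinarith [this]

-- the while-loop over the explicit stack (list head = top of stack; Source B's
-- stack.extend(reversed(children)) on an end-stack is `children ++ st` on a head-stack)
def pvRun (stack : List (List Char × List Char)) : List String :=
  match stack with
  | [] => []
  | (rem, cur) :: st =>
    if rem.isEmpty then String.ofList cur :: pvRun st
    else pvRun (pvChildScan [] rem (PySem.Set.ofList []) cur ++ st)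
termination_by (stack.map (fun f => (f.1.length + 1).factorial)).sum
decreasing_by
  · have := Nat.factorial_pos (rem.length + 1); simp; omega
  · simp only [List.map_append, List.sum_append, List.map_cons, List.sum_cons]
    have h1 := pvChildScan_measure rem [] (PySem.Set.ofList []) cur
    simp only [List.length_nil, Nat.zero_add] at h1
    have h2 : rem.length * rem.length.factorial < (rem.length + 1).factorial := by
      rw [Nat.factorial_succ]
      exact (Nat.mul_lt_mul_right rem.length.factorial_pos).mpr (by omega)
    omega

def gen_permuation_sorted_alt (letters : String) (current_str : String) : List String :=
  pvRun [(letters.toList, current_str.toList)]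

-- ===== PRECONDITION & SPEC =====
def Spec_gen_permuation_sorted (letters : String) (current_str : String) (out : List String) : Prop := out = gen_permuation_sorted_alt letters current_str
instance (letters : String) (current_str : String) (out : List String) : Decidable (Spec_gen_permuation_sorted letters current_str out) := by unfold Spec_gen_permuation_sorted; infer_instance

-- ===== CLAIM (what is proved, stated in full; the proofs are below) =====
def Claim_equal_gen_permuation_sorted : Prop := ∀ (letters : String) (current_str : String), Dom_gen_permuation_sorted letters current_str → Spec_gen_permuation_sorted letters current_str (gen_permuation_sorted letters current_str)

-- ===== LEMMAS AND PROOFS =====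

-- A's scan-and-recurse loop is B's child list, each child expanded by pvGenA
theorem pvLoopA_eq_childScan (rest : List Char) : ∀ (pre : List Char) (seen : PySem.Set Char)
    (cur : List Char),
    pvLoopA pre rest seen cur
      = ((pvChildScan pre rest seen cur).map (fun f => pvGenA f.1 f.2)).flatten := by
  induction rest with
  | nil => intro pre seen cur; rw [pvLoopA.eq_def, pvChildScan]; simp
  | cons c rs ih =>
    intro pre seen cur
    by_cases h : PySem.Set.contains seen c
    · rw [pvLoopA.eq_def, pvChildScan]
      simp only [if_pos h]
      exact ih _ _ _
    · rw [pvLoopA.eq_def, pvChildScan]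
      simp only [if_neg h, List.map_cons, List.flatten_cons]
      rw [ih]

-- the stack loop computes the concatenation of the recursive expansions of its frames
theorem pvRun_eq_flatten (stack : List (List Char × List Char)) :
    pvRun stack = (stack.map (fun f => pvGenA f.1 f.2)).flatten := by
  induction stack using pvRun.induct with
  | case1 => simp [pvRun]
  | case2 rem cur st h ih =>
    rw [pvRun]
    simp only [if_pos h, List.map_cons, List.flatten_cons, ih]
    have : rem = [] := List.isEmpty_iff.mp h
    subst this
    rw [pvGenA.eq_def]
    simp
  | case3 rem cur st h ih =>
    rw [pvRun]
    simp only [if_neg h, ih, List.map_append, List.flatten_append, List.map_cons,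
      List.flatten_cons]
    congr 1
    rw [pvGenA.eq_def, if_neg h, pvLoopA_eq_childScan]

-- ===== VERDICT (by name: the statement is the Claim_ definition above) =====
theorem gen_permuation_sorted_spec : Claim_equal_gen_permuation_sorted := by
  intro letters current_str _
  show gen_permuation_sorted letters current_str = gen_permuation_sorted_alt letters current_str
  unfold gen_permuation_sorted gen_permuation_sorted_alt
  rw [pvRun_eq_flatten]
  simp
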